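-- pv_equiv track=rewrite | github.com/nakevin96/AlogirithmPrac | random/18869.py | compress_planet
-- ===== SOURCE A (Python) =====
-- def compress_planet(planet_list):
--     sorted_planet = sorted(list(set(planet_list)))
--     planet_dict = dict()
--     for idx in range(len(sorted_planet)):
--         planet_dict[sorted_planet[idx]] = str(idx)
--     tmp = []
--     for p in planet_list:
--         tmp.append(planet_dict[p])
--     return ','.join(tmp)
-- ===== SOURCE B (Python) =====
-- def compress_planet(planet_list):
--     # rank of p = number of distinct values smaller than p; no sort, no dict
--     return ','.join(str(len({q for q in planet_list if q < p})) for p in planet_list)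
-- ===== Notes on version B (the rewrite author's own statement) =====
-- stated objective: simpler
-- what changed: Replaces the sort-unique-then-dict-then-map pipeline with a one-line direct definition of the rank: each element's compressed value is the count of distinct values smaller than it.
import Mathlib
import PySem

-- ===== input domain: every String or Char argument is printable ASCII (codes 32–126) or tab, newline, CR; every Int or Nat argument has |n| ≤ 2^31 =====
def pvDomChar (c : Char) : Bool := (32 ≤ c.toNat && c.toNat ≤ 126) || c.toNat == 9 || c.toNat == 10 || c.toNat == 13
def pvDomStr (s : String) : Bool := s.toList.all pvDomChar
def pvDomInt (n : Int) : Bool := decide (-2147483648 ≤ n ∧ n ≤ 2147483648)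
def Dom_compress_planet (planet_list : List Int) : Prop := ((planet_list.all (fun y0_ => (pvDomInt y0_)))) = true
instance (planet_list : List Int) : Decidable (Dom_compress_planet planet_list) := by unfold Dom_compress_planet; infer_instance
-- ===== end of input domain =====

-- B replaces A's sort-unique/dict/map pipeline by the direct definition of the rank
-- (count of distinct smaller values); objective: simpler.

-- ===== PORT A =====
def compress_planet (planet_list : List Int) : String :=
  let sorted_planet := PySem.List.sorted (PySem.Set.ofList planet_list) (fun x => x) false
  -- sorted_planet[idx]: idx ∈ range(len(sorted_planet)) is always in range, so .getD 0 is never taken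
  let planet_dict := (PySem.List.pyRange 0 (sorted_planet.length : Int) 1).foldl
    (fun d idx => d.insert ((PySem.List.pyGet? sorted_planet idx).getD 0) (PySem.Int.toStr idx))
    PySem.Dict.empty
  -- planet_dict[p]: every p of planet_list is a key, so KeyError is impossible and .getD "" is never taken
  let tmp := planet_list.foldl (fun acc p => acc ++ [(planet_dict.get? p).getD ""]) []
  PySem.Str.join "," tmp

-- ===== PORT B =====
def compress_planet_alt (planet_list : List Int) : String :=
  PySem.Str.join ","
    (planet_list.map (fun p =>
      PySem.Int.toStr
        (((PySem.Set.ofList (planet_list.filter (fun q => decide (q < p)))).length : Int))))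

-- ===== PRECONDITION & SPEC =====
def Spec_compress_planet (planet_list : List Int) (out : String) : Prop := out = compress_planet_alt planet_list
instance (planet_list : List Int) (out : String) : Decidable (Spec_compress_planet planet_list out) := by unfold Spec_compress_planet; infer_instance

-- ===== CLAIM (what is proved, stated in full; the proofs are below) =====
def Claim_equal_compress_planet : Prop := ∀ (planet_list : List Int), Dom_compress_planet planet_list → Spec_compress_planet planet_list (compress_planet planet_list)

-- ===== LEMMAS AND PROOFS =====

-- the dict A builds maps s[i] to str(i) (s nodup)
theorem pv_build_get (s : List Int) (hnd : s.Nodup) (n : Nat) (hn : n ≤ s.length)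
    (i : Nat) (hi : i < n) :
    ((PySem.List.pyRange 0 (n : Int) 1).foldl
      (fun d idx => d.insert ((PySem.List.pyGet? s idx).getD 0) (PySem.Int.toStr idx))
      PySem.Dict.empty).get? (s[i]'(lt_of_lt_of_le hi hn)) = some (PySem.Int.toStr (i : Int)) := by
  induction n with
  | zero => omega
  | succ m ih =>
    have hm : m ≤ s.length := Nat.le_of_succ_le hn
    have hrange : PySem.List.pyRange 0 ((m : Int) + 1) 1
        = PySem.List.pyRange 0 (m : Int) 1 ++ [(m : Int)] :=
      PySem.List.pyRange_one_succ_right (by positivity)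
    have hcast : ((Nat.succ m : Nat) : Int) = (m : Int) + 1 := by push_cast; ring
    rw [hcast, hrange, List.foldl_append]
    simp only [List.foldl_cons, List.foldl_nil]
    have hget : (PySem.List.pyGet? s ((m : Int))).getD 0 = s[m]'(by omega) := by
      rw [PySem.List.pyGet?_natCast]
      simp [List.getElem?_eq_getElem (by omega : m < s.length)]
    rw [hget]
    by_cases h : i = m
    · subst h
      exact PySem.Dict.get?_insert_self _ _ _
    · have hil : i < m := by omega
      have hne : s[i]'(by omega) ≠ s[m]'(by omega) := by
        intro he
        exact h ((List.Nodup.getElem_inj_iff hnd).mp he)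
      rw [PySem.Dict.get?_insert_of_ne _ _ hne]
      exact ih hm hil

-- in a strictly increasing list, the elements below s[i] are exactly the first i
theorem pv_filter_lt_length (s : List Int) (hp : s.Pairwise (· < ·))
    (i : Nat) (hi : i < s.length) :
    (s.filter (fun q => decide (q < s[i]))).length = i := by
  have hpg := List.pairwise_iff_getElem.mp hp
  obtain ⟨v, hv⟩ : ∃ v, s[i] = v := ⟨_, rfl⟩
  rw [hv]
  have hsplit : s = s.take i ++ s.drop i := (List.take_append_drop i s).symm
  have htake : (s.take i).filter (fun q => decide (q < v)) = s.take i := by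
    apply List.filter_eq_self.mpr
    intro x hx
    rw [List.mem_take_iff_getElem] at hx
    obtain ⟨j, hj, hxe⟩ := hx
    have hj' : j < i := by omega
    subst hxe
    rw [← hv]
    exact decide_eq_true (hpg j i (by omega) hi hj')
  have hdrop : (s.drop i).filter (fun q => decide (q < v)) = [] := by
    apply List.filter_eq_nil_iff.mpr
    intro x hx
    rw [List.mem_drop_iff_getElem] at hx
    obtain ⟨j, hj, hxe⟩ := hx
    subst hxe
    simp only [decide_eq_true_eq, not_lt]
    rw [← hv]
    by_cases hj0 : j = 0
    · subst hj0; exact le_refl _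
    · exact le_of_lt (hpg i (i + j) hi (by omega) (by omega))
  calc (s.filter (fun q => decide (q < v))).length
      = ((s.take i).filter (fun q => decide (q < v)) ++
         (s.drop i).filter (fun q => decide (q < v))).length := by
        conv_lhs => rw [hsplit]
        rw [List.filter_append]
    _ = i := by rw [htake, hdrop, List.append_nil, List.length_take]; omega

-- per-element agreement: A's dict lookup equals B's distinct-smaller count
theorem pv_elem_eq (l : List Int) (p : Int) (hpmem : p ∈ l) :
    (((PySem.List.pyRange 0 ((PySem.List.sorted (PySem.Set.ofList l) (fun x => x) false).length : Int) 1).foldl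
      (fun d idx => d.insert ((PySem.List.pyGet? (PySem.List.sorted (PySem.Set.ofList l) (fun x => x) false) idx).getD 0) (PySem.Int.toStr idx))
      PySem.Dict.empty).get? p).getD ""
    = PySem.Int.toStr (((PySem.Set.ofList (l.filter (fun q => decide (q < p)))).length : Int)) := by
  set s := PySem.List.sorted (PySem.Set.ofList l) (fun x => x) false with hs
  have hperm : s.Perm (PySem.Set.ofList l) := PySem.List.sorted_perm _ _ _
  have hpair : s.Pairwise (· < ·) := PySem.List.sorted_ofList_pairwise_lt l
  have hnd : s.Nodup := hpair.nodup
  have hmem : p ∈ s := hperm.mem_iff.mpr ((PySem.Set.mem_ofList _ _).mpr hpmem)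
  obtain ⟨i, hi, hie⟩ := List.mem_iff_getElem.mp hmem
  -- the right-hand count equals i
  have hcount : (PySem.Set.ofList (l.filter (fun q => decide (q < p)))).length = i := by
    have h1 : (PySem.Set.ofList (l.filter (fun q => decide (q < p)))).Perm
        ((PySem.Set.ofList l).filter (fun q => decide (q < p))) := by
      apply (List.perm_ext_iff_of_nodup (PySem.Set.nodup_ofList _)
        ((PySem.Set.nodup_ofList l).filter _)).mpr
      intro x
      simp [PySem.Set.mem_ofList, List.mem_filter]
    have h2 : ((PySem.Set.ofList l).filter (fun q => decide (q < p))).Perm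
        (s.filter (fun q => decide (q < p))) := (hperm.filter _).symm
    rw [h1.length_eq, h2.length_eq, ← hie]
    exact pv_filter_lt_length s hpair i hi
  rw [hcount, ← hie,
    pv_build_get s hnd s.length le_rfl i hi]
  rfl

-- ===== VERDICT (by name: the statement is the Claim_ definition above) =====
theorem compress_planet_spec : Claim_equal_compress_planet := by
  intro l _
  show compress_planet l = compress_planet_alt l
  unfold compress_planet compress_planet_alt
  simp only [PySem.List.foldl_append_singleton_eq_map, List.nil_append]
  congr 1
  apply List.map_congr_left
  intro p hp
  exact pv_elem_eq l p hp
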